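-- pv_equiv track=rewrite | github.com/LeonDavidZipp/cloudflightcodingcontest | lvl_2/examples/main.py | solve
-- ===== SOURCE A (Python) =====
-- def solve(line):
-- 	max_height = 0
-- 	max_width = 0
-- 	min_height = 0
-- 	min_width = 0
-- 	curr_height = 0
-- 	curr_width = 0
-- 	for el in line:
-- 		if el == 'W':
-- 			curr_height += 1
-- 		elif el == 'S':
-- 			curr_height -= 1
-- 		elif el == 'A':
-- 			curr_width -= 1
-- 		elif el == 'D':
-- 			curr_width += 1
-- 		if curr_height > max_height:
-- 			max_height = curr_height
-- 		if curr_height < min_height: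
-- 			min_height = curr_height
-- 		if curr_width > max_width:
-- 			max_width = curr_width
-- 		if curr_width < min_width:
-- 			min_width = curr_width
-- 	height = abs(max_height -min_height) + 1
-- 	width = abs(max_width - min_width) + 1
-- 	return [str(width), str(height)]
-- ===== SOURCE B (Python) =====
-- def solve(line):
--     deltas = {'W': (1, 0), 'S': (-1, 0), 'A': (0, -1), 'D': (0, 1)}
--
--     def summar(ds):
--         # divide & conquer: (total displacement, min prefix sum, max prefix sum),
--         # extrema include the empty prefix 0
--         if not ds:
--             return (0, 0, 0)
--         if len(ds) == 1:
--             d = ds[0]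
--             return (d, min(0, d), max(0, d))
--         k = len(ds) // 2
--         t1, m1, M1 = summar(ds[:k])
--         t2, m2, M2 = summar(ds[k:])
--         return (t1 + t2, min(m1, t1 + m2), max(M1, t1 + M2))
--
--     hs = [deltas.get(c, (0, 0))[0] for c in line]
--     ws = [deltas.get(c, (0, 0))[1] for c in line]
--     _, mnh, mxh = summar(hs)
--     _, mnw, mxw = summar(ws)
--     return [str(mxw - mnw + 1), str(mxh - mnh + 1)]
-- ===== Notes on version B (the rewrite author's own statement) =====
-- stated objective: alternative
-- what changed: Replaces A's single fused left-to-right scan with inline min/max tracking by a divide-and-conquer monoid reduction: each half of the move list is summarized as (total displacement, min prefix sum, max prefix sum) and the two summaries are merged with the associative combine (t1+t2, min(m1,t1+m2), max(M1,t1+M2)); correctness rests on the prefix-extrema concatenation law.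
import Mathlib
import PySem

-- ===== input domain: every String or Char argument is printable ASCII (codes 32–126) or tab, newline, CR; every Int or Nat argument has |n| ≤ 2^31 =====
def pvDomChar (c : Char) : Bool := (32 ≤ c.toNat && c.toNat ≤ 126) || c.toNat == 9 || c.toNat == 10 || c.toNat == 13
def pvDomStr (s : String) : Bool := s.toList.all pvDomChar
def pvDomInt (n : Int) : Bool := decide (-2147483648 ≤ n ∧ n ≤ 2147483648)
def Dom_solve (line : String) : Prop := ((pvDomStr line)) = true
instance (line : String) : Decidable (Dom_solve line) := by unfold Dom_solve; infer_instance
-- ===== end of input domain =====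

-- B replaces A's fused single-pass min/max scan with a divide-and-conquer monoid
-- reduction over (total, min prefix sum, max prefix sum) summaries (alternative algorithm).


-- ===== PORT A =====
-- state: (max_height, max_width, min_height, min_width, curr_height, curr_width)
def stepA (s : Int × Int × Int × Int × Int × Int) (el : Char) :
    Int × Int × Int × Int × Int × Int :=
  let p :=
    if el = 'W' then (s.2.2.2.2.1 + 1, s.2.2.2.2.2)
    else if el = 'S' then (s.2.2.2.2.1 - 1, s.2.2.2.2.2)
    else if el = 'A' then (s.2.2.2.2.1, s.2.2.2.2.2 - 1)
    else if el = 'D' then (s.2.2.2.2.1, s.2.2.2.2.2 + 1)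
    else (s.2.2.2.2.1, s.2.2.2.2.2)
  (if p.1 > s.1 then p.1 else s.1,
   if p.2 > s.2.1 then p.2 else s.2.1,
   if p.1 < s.2.2.1 then p.1 else s.2.2.1,
   if p.2 < s.2.2.2.1 then p.2 else s.2.2.2.1,
   p.1, p.2)

def solve (line : String) : List String :=
  let r := line.toList.foldl stepA (0, 0, 0, 0, 0, 0)
  let height := |r.1 - r.2.2.1| + 1
  let width := |r.2.1 - r.2.2.2.1| + 1
  [PySem.Int.toStr width, PySem.Int.toStr height]

-- ===== PORT B =====
-- deltas.get(c, (0,0))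
def dB (c : Char) : Int × Int :=
  if c = 'W' then (1, 0) else if c = 'S' then (-1, 0)
  else if c = 'A' then (0, -1) else if c = 'D' then (0, 1) else (0, 0)

-- divide & conquer summary: (total displacement, min prefix sum, max prefix sum),
-- extrema include the empty prefix 0
def summar (l : List Int) : Int × Int × Int :=
  match l with
  | [] => (0, 0, 0)
  | [d] => (d, min 0 d, max 0 d)
  | a :: b :: rest =>
    let k := (rest.length + 2) / 2
    let s1 := summar ((a :: b :: rest).take k)
    let s2 := summar ((a :: b :: rest).drop k)
    (s1.1 + s2.1, min s1.2.1 (s1.1 + s2.2.1), max s1.2.2 (s1.1 + s2.2.2))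
termination_by l.length
decreasing_by
  all_goals simp [List.length_take]
  omega

def solve_alt (line : String) : List String :=
  let hs := line.toList.map (fun c => (dB c).1)
  let ws := line.toList.map (fun c => (dB c).2)
  let sh := summar hs
  let sw := summar ws
  [PySem.Int.toStr (sw.2.2 - sw.2.1 + 1), PySem.Int.toStr (sh.2.2 - sh.2.1 + 1)]

-- ===== PRECONDITION & SPEC =====
def Spec_solve (line : String) (out : List String) : Prop := out = solve_alt line
instance (line : String) (out : List String) : Decidable (Spec_solve line out) := by unfold Spec_solve; infer_instance

-- ===== CLAIM (what is proved, stated in full; the proofs are below) =====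
def Claim_equal_solve : Prop := ∀ (line : String), Dom_solve line → Spec_solve line (solve line)

-- ===== LEMMAS AND PROOFS =====

-- spec functions: max / min prefix sum (including the empty prefix)
def mxF : List Int → Int
  | [] => 0
  | d :: ds => max 0 (d + mxF ds)

def mnF : List Int → Int
  | [] => 0
  | d :: ds => min 0 (d + mnF ds)

theorem mxF_nonneg (l : List Int) : 0 ≤ mxF l := by
  cases l <;> simp [mxF]

theorem mnF_nonpos (l : List Int) : mnF l ≤ 0 := by
  cases l <;> simp [mnF]

theorem mxF_append (l1 l2 : List Int) :
    mxF (l1 ++ l2) = max (mxF l1) (l1.sum + mxF l2) := by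
  induction l1 with
  | nil => have := mxF_nonneg l2; simp [mxF]; omega
  | cons d l1 ih =>
      have := mxF_nonneg l2
      simp [mxF, ih]; omega

theorem mnF_append (l1 l2 : List Int) :
    mnF (l1 ++ l2) = min (mnF l1) (l1.sum + mnF l2) := by
  induction l1 with
  | nil => have := mnF_nonpos l2; simp [mnF]; omega
  | cons d l1 ih =>
      have := mnF_nonpos l2
      simp [mnF, ih]; omega

-- the divide-and-conquer summary computes (sum, min prefix, max prefix)
theorem summar_eq (l : List Int) : summar l = (l.sum, mnF l, mxF l) := by
  fun_induction summar l with
  | case1 => simp [mnF, mxF]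
  | case2 d => simp [mnF, mxF]
  | case3 a b rest k s1 s2 ih1 ih2 =>
      simp only [s1, s2, ih1, ih2]
      have h := List.take_append_drop k (a :: b :: rest)
      conv_rhs => rw [← h]
      rw [List.sum_append, mnF_append, mxF_append]

set_option maxHeartbeats 2000000 in
theorem stepA_delta (mxh mxw mnh mnw ch cw : Int) (el : Char) :
    stepA (mxh, mxw, mnh, mnw, ch, cw) el =
      (max mxh (ch + (dB el).1), max mxw (cw + (dB el).2),
       min mnh (ch + (dB el).1), min mnw (cw + (dB el).2),
       ch + (dB el).1, cw + (dB el).2) := by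
  by_cases hW : el = 'W' <;> by_cases hS : el = 'S' <;>
    by_cases hA : el = 'A' <;> by_cases hD : el = 'D' <;>
    simp_all [stepA, dB, max_def, min_def] <;> split_ifs <;> omega

-- loop invariant: A's fold state = prefix-sum extrema of the delta lists
theorem key (xs : List Char) (mxh mxw mnh mnw ch cw : Int)
    (h1 : ch ≤ mxh) (h2 : mnh ≤ ch) (h3 : cw ≤ mxw) (h4 : mnw ≤ cw) :
    xs.foldl stepA (mxh, mxw, mnh, mnw, ch, cw) =
      (max mxh (ch + mxF (xs.map fun c => (dB c).1)),
       max mxw (cw + mxF (xs.map fun c => (dB c).2)),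
       min mnh (ch + mnF (xs.map fun c => (dB c).1)),
       min mnw (cw + mnF (xs.map fun c => (dB c).2)),
       ch + (xs.map fun c => (dB c).1).sum,
       cw + (xs.map fun c => (dB c).2).sum) := by
  induction xs generalizing mxh mxw mnh mnw ch cw with
  | nil => simp [mxF, mnF]; omega
  | cons x xs ih =>
      rw [List.foldl_cons, stepA_delta,
        ih _ _ _ _ _ _ (le_max_right _ _) (min_le_right _ _)
          (le_max_right _ _) (min_le_right _ _)]
      have a1 := mxF_nonneg (xs.map fun c => (dB c).1)
      have a2 := mxF_nonneg (xs.map fun c => (dB c).2)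
      have a3 := mnF_nonpos (xs.map fun c => (dB c).1)
      have a4 := mnF_nonpos (xs.map fun c => (dB c).2)
      simp [mxF, mnF]
      refine ⟨?_, ?_, ?_, ?_, ?_, ?_⟩ <;> omega

-- ===== VERDICT (by name: the statement is the Claim_ definition above) =====
theorem solve_spec : Claim_equal_solve := by
  intro line _
  unfold Spec_solve solve solve_alt
  rw [key _ 0 0 0 0 0 0 le_rfl le_rfl le_rfl le_rfl]
  simp only [summar_eq]
  have a1 := mxF_nonneg (line.toList.map fun c => (dB c).1)
  have a2 := mxF_nonneg (line.toList.map fun c => (dB c).2)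
  have a3 := mnF_nonpos (line.toList.map fun c => (dB c).1)
  have a4 := mnF_nonpos (line.toList.map fun c => (dB c).2)
  congr 1
  · congr 1; rw [abs_of_nonneg (by omega)]; omega
  · congr 2; rw [abs_of_nonneg (by omega)]; omega
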